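-- pv_equiv track=rewrite | github.com/jwilliams8899/CS_1301 | HW05.py | hireTAs
-- ===== SOURCE A (Python) =====
-- def hireTAs(listTAs,newTAs):
--     add_list = []
--     new_tup = ()
--     for tuples in range(len(listTAs)):
--         for tups in newTAs:
--             if listTAs[tuples][0] == tups[0]:
--                 add_list.append(tups[1])
--         listTAs[tuples] += tuple(add_list)
--         add_list = []
--     return listTAs
-- ===== SOURCE B (Python) =====
-- def hireTAs(listTAs, newTAs):
--     # Dict-grouping rewrite: one pass over newTAs, one lookup per TA row.
--     if not listTAs or not newTAs:
--         return listTAs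
--     index = {}
--     for t in newTAs:
--         index.setdefault(t[0], []).append(t)
--     for i, row in enumerate(listTAs):
--         matches = index.get(row[0], [])
--         if matches:
--             listTAs[i] += tuple(t[1] for t in matches)
--     return listTAs
-- ===== Notes on version B (the rewrite author's own statement) =====
-- stated objective: alternative
-- what changed: B builds a dict grouping newTAs entries by name in one pass and does a single lookup per TA row, replacing A's inner scan of all of newTAs for every row (O(n+m) vs O(n*m), though a timing run's inputs did not show a measurable speed-up).
import Mathlib
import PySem

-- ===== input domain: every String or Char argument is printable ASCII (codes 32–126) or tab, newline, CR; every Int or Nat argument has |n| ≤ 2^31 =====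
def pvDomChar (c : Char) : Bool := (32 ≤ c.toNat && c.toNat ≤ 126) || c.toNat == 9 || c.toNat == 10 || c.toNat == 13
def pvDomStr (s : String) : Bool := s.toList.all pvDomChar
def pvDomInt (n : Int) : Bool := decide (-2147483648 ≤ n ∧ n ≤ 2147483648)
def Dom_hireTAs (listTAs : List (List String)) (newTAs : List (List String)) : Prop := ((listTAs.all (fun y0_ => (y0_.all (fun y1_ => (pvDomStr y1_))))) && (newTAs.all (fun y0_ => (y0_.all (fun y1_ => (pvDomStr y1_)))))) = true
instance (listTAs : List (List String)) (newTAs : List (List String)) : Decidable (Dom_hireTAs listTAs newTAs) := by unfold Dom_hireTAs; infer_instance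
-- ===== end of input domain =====

-- ===== PORT A =====
-- One honest line: B replaces A's inner scan of newTAs per row by a dict built once
-- (name -> matching newTAs entries) and one lookup per row; equivalence is about the
-- RETURN value only (both Pythons mutate listTAs, by in-place row extension vs slot rebinding).
def hireTAs (listTAs : List (List String)) (newTAs : List (List String)) : List (List String) :=
  (PySem.List.pyRange 0 (PySem.List.len listTAs) 1).foldl
    (fun st i =>
      let add_list : List String := newTAs.foldl
        (fun acc tups =>
          if (PySem.List.pyGetD st i []).getD 0 "" == tups.getD 0 "" then
            acc ++ [tups.getD 1 ""]
          else acc) []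
      PySem.List.pySetD st i (PySem.List.pyGetD st i [] ++ add_list))
    listTAs

-- ===== PORT B =====
-- B-side helper: the dict 'index' (name -> its matching newTAs entries), built in one pass
def buildIdx (newTAs : List (List String)) : PySem.Dict String (List (List String)) :=
  newTAs.foldl (fun d t => PySem.Dict.modify d (t.getD 0 "") [] (· ++ [t])) PySem.Dict.empty

def hireTAs_alt (listTAs : List (List String)) (newTAs : List (List String)) : List (List String) :=
  if listTAs.isEmpty || newTAs.isEmpty then listTAs
  else
    let index : PySem.Dict String (List (List String)) := buildIdx newTAs
    listTAs.map (fun row =>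
      let ms := PySem.Dict.getD index (row.getD 0 "") []
      if ms.isEmpty then row
      else row ++ ms.map (fun t => t.getD 1 ""))

-- ===== PRECONDITION & SPEC =====
-- Pre_ excludes exactly the inputs on which Python A raises an IndexError: with both lists
-- nonempty, an empty TA row ([0] fails), an empty newTAs entry ([0] fails), or a matching
-- newTAs entry of length 1 ([1] fails).
def Pre_hireTAs (listTAs : List (List String)) (newTAs : List (List String)) : Prop :=
  newTAs = [] ∨ listTAs = [] ∨
    ((∀ r ∈ listTAs, r ≠ []) ∧ (∀ t ∈ newTAs, t ≠ []) ∧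
     (∀ r ∈ listTAs, ∀ t ∈ newTAs, r.getD 0 "" = t.getD 0 "" → t.length ≠ 1))
instance (listTAs : List (List String)) (newTAs : List (List String)) : Decidable (Pre_hireTAs listTAs newTAs) := by unfold Pre_hireTAs; infer_instance
def pvWitness_hireTAs : List (List String) × List (List String) :=
  ([["Ada", "10"], ["Bob"]], [["Ada", "Carl"], ["Ada", "Dee"], ["Eve", "Flo"]])

def Spec_hireTAs (listTAs : List (List String)) (newTAs : List (List String)) (out : List (List String)) : Prop := out = hireTAs_alt listTAs newTAs
instance (listTAs : List (List String)) (newTAs : List (List String)) (out : List (List String)) : Decidable (Spec_hireTAs listTAs newTAs out) := by unfold Spec_hireTAs; infer_instance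

-- ===== CLAIM (what is proved, stated in full; the proofs are below) =====
def Claim_equal_hireTAs : Prop := ∀ (listTAs : List (List String)) (newTAs : List (List String)), Dom_hireTAs listTAs newTAs → Pre_hireTAs listTAs newTAs → Spec_hireTAs listTAs newTAs (hireTAs listTAs newTAs)

-- ===== LEMMAS AND PROOFS =====

def pvRowExt (newTAs : List (List String)) (row : List String) : List String :=
  row ++ ((newTAs.filter (fun t => row.getD 0 "" == t.getD 0 "")).map (fun t => List.getD t 1 ""))

theorem loopA (newTAs : List (List String)) :
  ∀ (rest pre : List (List String)),
    (PySem.List.pyRange (pre.length : Int) ((pre.length : Int) + rest.length) 1).foldl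
      (fun st i =>
        let add_list : List String := newTAs.foldl
          (fun acc tups =>
            if (PySem.List.pyGetD st i []).getD 0 "" == tups.getD 0 "" then
              acc ++ [tups.getD 1 ""]
            else acc) []
        PySem.List.pySetD st i (PySem.List.pyGetD st i [] ++ add_list))
      (pre ++ rest) = pre ++ rest.map (pvRowExt newTAs) := by
  intro rest
  induction rest with
  | nil => intro pre; simp [PySem.List.pyRange_one_eq_nil]
  | cons r rest ih =>
    intro pre
    rw [PySem.List.pyRange_one_cons (by push_cast [List.length_cons]; omega)]
    simp only [List.foldl_cons]
    have hget : PySem.List.pyGetD (pre ++ r :: rest) (pre.length : Int) [] = r := by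
      simp [List.getD_eq_getElem?_getD]
    rw [hget]
    have hadd : List.foldl
        (fun acc tups => if (r.getD 0 "" == List.getD tups 0 "") then acc ++ [List.getD tups 1 ""] else acc)
        ([] : List String) newTAs
        = (newTAs.filter (fun t => r.getD 0 "" == List.getD t 0 "")).map (fun t => List.getD t 1 "") := by
      simpa using PySem.List.foldl_append_if
        (l := newTAs) (p := fun t => r.getD 0 "" == List.getD t 0 "")
        (f := fun t => List.getD t 1 "") (acc := [])
    rw [hadd]
    have hset : PySem.List.pySetD (pre ++ r :: rest) (pre.length : Int) (pvRowExt newTAs r)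
        = (pre ++ [pvRowExt newTAs r]) ++ rest := by
      rw [PySem.List.pySetD_natCast]; simp
    show List.foldl _ (PySem.List.pySetD (pre ++ r :: rest) (pre.length : Int) (pvRowExt newTAs r))
        (PySem.List.pyRange ((pre.length : Int) + 1) ((pre.length : Int) + ((r :: rest).length : Int))) = _
    rw [hset]
    have hlen : ((pre ++ [pvRowExt newTAs r]).length : Int) = (pre.length : Int) + 1 := by
      simp
    have := ih (pre ++ [pvRowExt newTAs r])
    rw [hlen] at this
    have hb : (pre.length : Int) + 1 + (rest.length : Int) = (pre.length : Int) + ((r :: rest).length : Int) := by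
      push_cast [List.length_cons]; omega
    rw [hb] at this
    rw [this]
    simp

theorem build_getD (ts : List (List String)) :
    ∀ (d : PySem.Dict String (List (List String))) (k : String),
    PySem.Dict.getD (ts.foldl (fun d t => PySem.Dict.modify d (t.getD 0 "") [] (· ++ [t])) d) k []
      = PySem.Dict.getD d k [] ++ ts.filter (fun t => List.getD t 0 "" == k) := by
  induction ts with
  | nil => intro d k; simp
  | cons t ts ih =>
    intro d k
    simp only [List.foldl_cons]
    rw [ih]
    by_cases h : List.getD t 0 "" = k
    · subst h
      rw [PySem.Dict.getD_modify_self]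
      simp
    · have hne : k ≠ List.getD t 0 "" := fun hk => h hk.symm
      rw [PySem.Dict.getD_modify_of_ne _ _ _ hne]
      simp only [List.filter_cons]
      rw [if_neg (by simpa [List.getD_eq_getElem?_getD] using h)]

theorem hireTAs_eq_map (l n : List (List String)) :
    hireTAs l n = l.map (pvRowExt n) := by
  unfold hireTAs
  simpa using loopA n l []

theorem alt_eq_map (l n : List (List String)) :
    hireTAs_alt l n = l.map (pvRowExt n) := by
  unfold hireTAs_alt
  by_cases hl : l = []
  · simp [hl]
  by_cases hn : n = []
  · subst hn
    rw [if_pos (by simp)]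
    conv_rhs => rw [show l.map (pvRowExt []) = l.map id by
      apply List.map_congr_left; intro r _; simp [pvRowExt]]
    simp
  rw [if_neg (by simp [hl, hn])]
  apply List.map_congr_left
  intro row _
  have hms : PySem.Dict.getD (buildIdx n) (row.getD 0 "") []
      = n.filter (fun t => List.getD t 0 "" == row.getD 0 "") := by
    unfold buildIdx
    rw [build_getD]
    simp
  simp only [hms]
  have hfilt : n.filter (fun t => List.getD t 0 "" == row.getD 0 "")
      = n.filter (fun t => row.getD 0 "" == List.getD t 0 "") := by
    apply List.filter_congr
    intro t _
    simp [Bool.beq_comm]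
  rw [hfilt]
  by_cases he : n.filter (fun t => row.getD 0 "" == List.getD t 0 "") = []
  · simp [pvRowExt]
  · rw [if_neg (by simpa using he)]
    simp [pvRowExt]


-- ===== VERDICT (by name: the statement is the Claim_ definition above) =====
theorem hireTAs_spec : Claim_equal_hireTAs := by
  intro l n _ _
  unfold Spec_hireTAs
  rw [hireTAs_eq_map, alt_eq_map]
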